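-- pv_equiv track=rewrite | github.com/Abacadabras/algo-python3 | contest_03_semester1/f.py | foo_main
-- ===== SOURCE A (Python) =====
-- def foo_main(num: str) -> int:
--
--     number = 0
--     degree_number = 0
--     base = 60
--
--     for _ in range(len(num) - 1, -1, -1):
--         symbol = num[_]
--         if symbol == '.':
--             degree_number += 1
--         elif symbol == 'v':
--             number += 1 * base**degree_number
--         elif symbol == '<':
--             number += 10 * base**degree_number
--
--     return number
-- ===== SOURCE B (Python) =====
-- def foo_main(num: str) -> int:
--     acc = 0
--     for symbol in num:
--         if symbol == '.':
--             acc *= 60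
--         elif symbol == 'v':
--             acc += 1
--         elif symbol == '<':
--             acc += 10
--     return acc
-- ===== Notes on version B (the rewrite author's own statement) =====
-- stated objective: simpler
-- what changed: Replaces the reversed index loop with a power/degree counter by a single left-to-right Horner pass that scales one accumulator by 60 at each dot, eliminating the degree state and base**degree computation.
import Mathlib
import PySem

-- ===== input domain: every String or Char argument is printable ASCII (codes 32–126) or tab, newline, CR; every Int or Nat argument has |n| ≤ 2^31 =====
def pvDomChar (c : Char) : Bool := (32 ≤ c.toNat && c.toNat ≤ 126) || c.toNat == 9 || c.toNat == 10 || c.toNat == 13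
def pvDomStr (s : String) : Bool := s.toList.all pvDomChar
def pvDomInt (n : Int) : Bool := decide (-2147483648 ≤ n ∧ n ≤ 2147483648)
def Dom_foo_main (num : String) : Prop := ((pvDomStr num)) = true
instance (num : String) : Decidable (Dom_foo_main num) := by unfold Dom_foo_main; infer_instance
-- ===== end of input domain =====

-- B replaces A's reversed index loop with degree/power state by a single left-to-right Horner pass (simpler).

-- ===== PORT A =====
-- one iteration of A's loop body: state = (number, degree_number)
def fooStepA (st : Int × Nat) (symbol : Char) : Int × Nat :=
  if symbol = '.' then (st.1, st.2 + 1)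
  else if symbol = 'v' then (st.1 + 1 * (60:Int) ^ st.2, st.2)
  else if symbol = '<' then (st.1 + 10 * (60:Int) ^ st.2, st.2)
  else st

def foo_main (num : String) : Int :=
  ((PySem.List.pyRange ((num.toList.length : Int) - 1) (-1) (-1)).foldl
    (fun st i => fooStepA st (PySem.List.pyGetD num.toList i ' ')) ((0:Int), (0:Nat))).1

-- ===== PORT B =====
-- one iteration of B's Horner loop
def fooStepB (acc : Int) (symbol : Char) : Int :=
  if symbol = '.' then acc * 60
  else if symbol = 'v' then acc + 1
  else if symbol = '<' then acc + 10
  else acc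

def foo_main_alt (num : String) : Int :=
  num.toList.foldl fooStepB 0

-- ===== PRECONDITION & SPEC =====
def Spec_foo_main (num : String) (out : Int) : Prop := out = foo_main_alt num
instance (num : String) (out : Int) : Decidable (Spec_foo_main num out) := by unfold Spec_foo_main; infer_instance

-- ===== CLAIM (what is proved, stated in full; the proofs are below) =====
def Claim_equal_foo_main : Prop := ∀ (num : String), Dom_foo_main num → Spec_foo_main num (foo_main num)

-- ===== LEMMAS AND PROOFS =====

-- Horner's accumulator is affine in its starting value: the start gets scaled by 60^(number of dots).
theorem fooStepB_affine (l : List Char) : ∀ (a : Int),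
    l.foldl fooStepB a = a * 60 ^ (l.count '.') + l.foldl fooStepB 0 := by
  induction l with
  | nil => intro a; simp
  | cons c t ih =>
    intro a
    simp only [List.foldl_cons, List.count_cons]
    by_cases h1 : c = '.'
    · have hc : (c == '.') = true := by simp [h1]
      have e : ∀ x : Int, fooStepB x c = x * 60 := by
        intro x; unfold fooStepB; rw [if_pos h1]
      rw [e, e, ih (a * 60), ih 0]
      simp [hc, pow_succ]; ring
    · have hc : (c == '.') = false := by simp [h1]
      by_cases h2 : c = 'v'
      · have e : ∀ x : Int, fooStepB x c = x + 1 := by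
          intro x; unfold fooStepB; rw [if_neg h1, if_pos h2]
        rw [e, e, ih (a + 1), ih (0 + 1)]
        simp [hc]; ring
      · by_cases h3 : c = '<'
        · have e : ∀ x : Int, fooStepB x c = x + 10 := by
            intro x; unfold fooStepB; rw [if_neg h1, if_neg h2, if_pos h3]
          rw [e, e, ih (a + 10), ih (0 + 10)]
          simp [hc]; ring
        · have e : ∀ x : Int, fooStepB x c = x := by
            intro x; unfold fooStepB; rw [if_neg h1, if_neg h2, if_neg h3]
          rw [e, e, ih a]
          simp [hc]

-- A's loop over the reversed string computes B's Horner value, scaled by the starting degree.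
theorem fooA_reverse (l : List Char) (n0 : Int) (d0 : Nat) :
    l.reverse.foldl fooStepA (n0, d0) =
      (n0 + 60 ^ d0 * l.foldl fooStepB 0, d0 + l.count '.') := by
  induction l generalizing n0 d0 with
  | nil => simp
  | cons c t ih =>
    simp only [List.reverse_cons, List.foldl_append, List.foldl_cons, List.foldl_nil,
      List.count_cons, ih]
    by_cases h1 : c = '.'
    · have hc : (c == '.') = true := by simp [h1]
      have eA : ∀ st : Int × Nat, fooStepA st c = (st.1, st.2 + 1) := by
        intro st; unfold fooStepA; rw [if_pos h1]
      have eB : fooStepB 0 c = 0 := by unfold fooStepB; rw [if_pos h1]; ring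
      rw [eA, eB]
      simp [hc]; omega
    · have hc : (c == '.') = false := by simp [h1]
      by_cases h2 : c = 'v'
      · have eA : ∀ st : Int × Nat, fooStepA st c = (st.1 + 1 * 60 ^ st.2, st.2) := by
          intro st; unfold fooStepA; rw [if_neg h1, if_pos h2]
        have eB : fooStepB 0 c = 1 := by unfold fooStepB; rw [if_neg h1, if_pos h2]; ring
        rw [eA, eB, fooStepB_affine t 1]
        simp [hc, pow_add]; ring
      · by_cases h3 : c = '<'
        · have eA : ∀ st : Int × Nat, fooStepA st c = (st.1 + 10 * 60 ^ st.2, st.2) := by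
            intro st; unfold fooStepA; rw [if_neg h1, if_neg h2, if_pos h3]
          have eB : fooStepB 0 c = 10 := by
            unfold fooStepB; rw [if_neg h1, if_neg h2, if_pos h3]; ring
          rw [eA, eB, fooStepB_affine t 10]
          simp [hc, pow_add]; ring
        · have eA : ∀ st : Int × Nat, fooStepA st c = st := by
            intro st; unfold fooStepA; rw [if_neg h1, if_neg h2, if_neg h3]
          have eB : fooStepB 0 c = 0 := by
            unfold fooStepB; rw [if_neg h1, if_neg h2, if_neg h3]
          rw [eA, eB]
          simp [hc]

-- ===== VERDICT (by name: the statement is the Claim_ definition above) =====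
theorem foo_main_spec : Claim_equal_foo_main := by
  intro num _
  unfold Spec_foo_main foo_main foo_main_alt
  rw [PySem.List.pyRange_neg_one_eq_reverse]
  simp only [neg_add_cancel, sub_add_cancel]
  rw [← List.foldl_map, List.map_reverse, PySem.List.map_pyGetD_pyRange_zero', fooA_reverse]
  simp
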